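-- pv_equiv track=rewrite | github.com/ModiDiya/Tic_Tac_Toe | def is_valid_integer(word).py | count_valid_integers
-- ===== SOURCE A (Python) =====
-- def is_valid_integer(word):
--     """Checks if a word is a valid integer (optional + or - followed by digits)."""
--     if not word:
--         return False
--     if word[0] in "+-" and len(word) > 1:  # If first char is + or -, remove it
--         word = word[1:]
--     return word.isdigit()  # Ensure remaining part is digits only
--
-- def count_valid_integers(code):
--     """Splits code into words and counts valid integers using match-case."""
--     words = []
--     word = ""
--
--     # Extract words manually to handle special characters
--     for char in code:
--         match char:
--             case "+" | "-" | "0" | "1" | "2" | "3" | "4" | "5" | "6" | "7" | "8" | "9":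
--                 word += char  # Build potential integer word
--             case _:
--                 if word:  # If a word was built, store it
--                     words.append(word)
--                     word = ""
--
--     if word:  # Add last word if present
--         words.append(word)
--
--     # Count valid integers
--     count = 0
--     valid_integers = []
--
--     for w in words:
--         match is_valid_integer(w):
--             case True:
--                 valid_integers.append(w)
--                 count += 1
--
--     return count, valid_integers
-- ===== SOURCE B (Python) =====
-- def count_valid_integers(code):
--     """Single-pass DFA: validity is decided state-by-state while scanning, so no
--     intermediate word list and no separate validator pass are needed.
--     States: 0 = outside a token, 1 = seen only a sign, 2 = valid so far, 3 = invalid."""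
--     valid = []
--     buf = []
--     state = 0
--     for ch in code:
--         if ch.isdigit():
--             buf.append(ch)
--             state = 2 if state in (0, 1, 2) else 3
--         elif ch in "+-":
--             buf.append(ch)
--             state = 1 if state == 0 else 3
--         else:
--             if buf:
--                 if state == 2:
--                     valid.append("".join(buf))
--                 buf = []
--             state = 0
--     if buf and state == 2:
--         valid.append("".join(buf))
--     return len(valid), valid
-- ===== Notes on version B (the rewrite author's own statement) =====
-- stated objective: alternative
-- what changed: Replaced A's two-phase tokenize-then-validate design (build a word list via string concatenation, then re-scan each word with is_valid_integer) by a single-pass finite-state machine that classifies each token incrementally (outside / sign-only / valid / invalid) and emits valid tokens at boundaries, so no word list and no second validation pass exist.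
import Mathlib
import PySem

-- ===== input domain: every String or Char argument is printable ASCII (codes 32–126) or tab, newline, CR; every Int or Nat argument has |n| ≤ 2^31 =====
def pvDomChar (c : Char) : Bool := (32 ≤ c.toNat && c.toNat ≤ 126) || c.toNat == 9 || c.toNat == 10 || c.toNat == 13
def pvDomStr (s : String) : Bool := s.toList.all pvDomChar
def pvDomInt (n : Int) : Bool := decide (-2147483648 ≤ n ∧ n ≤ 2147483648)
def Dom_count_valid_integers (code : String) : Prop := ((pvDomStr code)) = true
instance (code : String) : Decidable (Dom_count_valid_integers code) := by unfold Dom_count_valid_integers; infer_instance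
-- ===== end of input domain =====

-- B replaces A's two-phase tokenize-then-validate design by a single-pass finite-state
-- machine (objective: alternative); same return value.

-- ===== PORT A =====
-- is_valid_integer: strip one optional leading sign (only when len > 1), then isdigit
def pvAValid (w : List Char) : Bool :=
  if w.isEmpty then false
  else
    let w := if (w.headD ' ' == '+' || w.headD ' ' == '-') && decide (w.length > 1)
             then PySem.List.slice w (some 1) none else w
    PySem.Chars.strIsdigit w

-- the match-case arms of A's tokenizer, literally
def pvATok (c : Char) : Bool :=
  c == '+' || c == '-' || c == '0' || c == '1' || c == '2' || c == '3' || c == '4' ||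
  c == '5' || c == '6' || c == '7' || c == '8' || c == '9'

def pvAStep (st : List (List Char) × List Char) (c : Char) : List (List Char) × List Char :=
  if pvATok c then (st.1, st.2 ++ [c])
  else if st.2.isEmpty then st else (st.1 ++ [st.2], [])

def count_valid_integers (code : String) : Int × List String :=
  let st := code.toList.foldl pvAStep ([], [])
  let words := if st.2.isEmpty then st.1 else st.1 ++ [st.2]
  let res := words.foldl
    (fun (acc : Int × List (List Char)) w =>
      if pvAValid w then (acc.1 + 1, acc.2 ++ [w]) else acc) (0, [])
  (res.1, res.2.map String.ofList)

-- ===== PORT B =====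
-- DFA state: 0 = outside a token, 1 = seen only a sign, 2 = valid so far, 3 = invalid
def pvBStep (st : List (List Char) × List Char × Nat) (c : Char) :
    List (List Char) × List Char × Nat :=
  if PySem.Chars.isdigit c then
    (st.1, st.2.1 ++ [c], if st.2.2 == 0 || st.2.2 == 1 || st.2.2 == 2 then 2 else 3)
  else if "+-".toList.contains c then
    (st.1, st.2.1 ++ [c], if st.2.2 == 0 then 1 else 3)
  else
    ((if st.2.1.isEmpty then st.1
      else if st.2.2 == 2 then st.1 ++ [st.2.1] else st.1), [], 0)

def count_valid_integers_alt (code : String) : Int × List String :=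
  let st := code.toList.foldl pvBStep ([], [], 0)
  let valid := if !st.2.1.isEmpty && st.2.2 == 2 then st.1 ++ [st.2.1] else st.1
  ((valid.length : Int), valid.map String.ofList)

-- ===== PRECONDITION & SPEC =====
def Spec_count_valid_integers (code : String) (out : Int × List String) : Prop := out = count_valid_integers_alt code
instance (code : String) (out : Int × List String) : Decidable (Spec_count_valid_integers code out) := by unfold Spec_count_valid_integers; infer_instance

-- ===== CLAIM (what is proved, stated in full; the proofs are below) =====
def Claim_equal_count_valid_integers : Prop := ∀ (code : String), Dom_count_valid_integers code → Spec_count_valid_integers code (count_valid_integers code)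

-- ===== LEMMAS AND PROOFS =====

-- the DFA state B maintains for the current partial token, as a function of that token
def pvCls (w : List Char) : Nat :=
  if w.isEmpty then 0
  else if w == ['+'] || w == ['-'] then 1
  else if pvAValid w then 2 else 3

-- a digit character is one of A's token arms and is not a sign
theorem digit_facts (c : Char) (h : PySem.Chars.isdigit c = true) :
    pvATok c = true ∧ (c == '+' || c == '-') = false := by
  simp only [PySem.Chars.isdigit, Bool.and_eq_true, decide_eq_true_eq, Char.le_def,
    UInt32.le_iff_toNat_le] at h
  have e0 : ('0').val.toNat = 48 := rfl
  have e1 : ('1').val.toNat = 49 := rfl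
  have e2 : ('2').val.toNat = 50 := rfl
  have e3 : ('3').val.toNat = 51 := rfl
  have e4 : ('4').val.toNat = 52 := rfl
  have e5 : ('5').val.toNat = 53 := rfl
  have e6 : ('6').val.toNat = 54 := rfl
  have e7 : ('7').val.toNat = 55 := rfl
  have e8 : ('8').val.toNat = 56 := rfl
  have e9 : ('9').val.toNat = 57 := rfl
  have ep : ('+').val.toNat = 43 := rfl
  have em : ('-').val.toNat = 45 := rfl
  constructor
  · simp only [pvATok, Bool.or_eq_true, beq_iff_eq, Char.ext_iff, UInt32.ext_iff]
    omega
  · simp only [Bool.or_eq_false_iff, beq_eq_false_iff_ne, ne_eq, Char.ext_iff, UInt32.ext_iff]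
    omega

-- membership in "+-" is the two sign equalities
theorem sign_mem (c : Char) : "+-".toList.contains c = (c == '+' || c == '-') := by
  have h : "+-".toList = ['+', '-'] := by decide
  simp [h, beq_eq_decide]

-- a non-digit non-sign character matches none of A's arms
theorem other_tok (c : Char) (hd : PySem.Chars.isdigit c = false)
    (hs : (c == '+' || c == '-') = false) : pvATok c = false := by
  simp only [PySem.Chars.isdigit, Bool.and_eq_false_iff, decide_eq_false_iff_not,
    Char.le_def, UInt32.le_iff_toNat_le, not_le] at hd
  simp only [Bool.or_eq_false_iff, beq_eq_false_iff_ne, ne_eq, Char.ext_iff, UInt32.ext_iff] at hs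
  have e0 : ('0').val.toNat = 48 := rfl
  have e1 : ('1').val.toNat = 49 := rfl
  have e2 : ('2').val.toNat = 50 := rfl
  have e3 : ('3').val.toNat = 51 := rfl
  have e4 : ('4').val.toNat = 52 := rfl
  have e5 : ('5').val.toNat = 53 := rfl
  have e6 : ('6').val.toNat = 54 := rfl
  have e7 : ('7').val.toNat = 55 := rfl
  have e8 : ('8').val.toNat = 56 := rfl
  have e9 : ('9').val.toNat = 57 := rfl
  have ep : ('+').val.toNat = 43 := rfl
  have em : ('-').val.toNat = 45 := rfl
  simp only [pvATok, Bool.or_eq_false_iff, beq_eq_false_iff_ne, ne_eq, Char.ext_iff, UInt32.ext_iff]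
  omega

-- strIsdigit through appending one character
theorem strIsdigit_append (xs : List Char) (c : Char) :
    PySem.Chars.strIsdigit (xs ++ [c]) =
      ((xs.isEmpty || PySem.Chars.strIsdigit xs) && PySem.Chars.isdigit c) := by
  cases xs with
  | nil => simp [PySem.Chars.strIsdigit]
  | cons x xs => simp [PySem.Chars.strIsdigit, Bool.and_assoc]

-- pvAValid through appending one character, for a nonempty prefix
theorem valid_append (x : Char) (xs : List Char) (c : Char) :
    pvAValid ((x :: xs) ++ [c]) =
      ((((x :: xs) == ['+'] || (x :: xs) == ['-']) || pvAValid (x :: xs)) &&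
        PySem.Chars.isdigit c) := by
  have hsl : ∀ (ys : List Char), PySem.List.slice (x :: ys) (some 1) none = ys := by
    intro ys; exact PySem.List.slice_from _ (by simp)
  by_cases hx : (x == '+' || x == '-') = true
  · cases xs with
    | nil =>
      have h1 : pvAValid [x] = false := by
        rcases Bool.or_eq_true _ _ |>.mp hx with h | h <;>
          (rw [beq_iff_eq] at h; subst h; decide)
      have h2 : ((x :: ([] : List Char)) == ['+'] || (x :: ([] : List Char)) == ['-']) = true := by
        rcases Bool.or_eq_true _ _ |>.mp hx with h | h <;>
          (rw [beq_iff_eq] at h; subst h; decide)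
      simp only [h1, h2, Bool.or_false, Bool.true_and]
      simp [pvAValid, hx, hsl, PySem.Chars.strIsdigit]
    | cons y ys =>
      have h2 : ((x :: y :: ys) == ['+'] || (x :: y :: ys) == ['-']) = false := by simp
      have hA : pvAValid (x :: y :: ys) = PySem.Chars.strIsdigit (y :: ys) := by
        simp [pvAValid, hx, hsl]
      have hA' : pvAValid ((x :: y :: ys) ++ [c]) = PySem.Chars.strIsdigit ((y :: ys) ++ [c]) := by
        simp only [List.cons_append]
        simp [pvAValid, hx, hsl]
      rw [hA', hA, h2, strIsdigit_append]
      simp [PySem.Chars.strIsdigit]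
  · have hx' : (x == '+' || x == '-') = false := by simpa using hx
    have h2 : ((x :: xs) == ['+'] || (x :: xs) == ['-']) = false := by
      cases xs with
      | nil => simpa using hx
      | cons y ys => simp
    have hA : pvAValid (x :: xs) = PySem.Chars.strIsdigit (x :: xs) := by
      simp [pvAValid, hx']
    have hA' : pvAValid ((x :: xs) ++ [c]) = PySem.Chars.strIsdigit ((x :: xs) ++ [c]) := by
      simp only [List.cons_append]
      simp [pvAValid, hx']
    rw [hA', hA, h2, strIsdigit_append]
    simp [PySem.Chars.strIsdigit]

-- a single sign is not a valid integer
theorem sign_not_valid (w : List Char) (h : (w == ['+'] || w == ['-']) = true) :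
    pvAValid w = false := by
  rcases Bool.or_eq_true _ _ |>.mp h with h | h <;> (rw [beq_iff_eq] at h; subst h; decide)

-- pvCls of a token grown past one character is decided by pvAValid alone
theorem pvCls_snoc (x : Char) (xs : List Char) (c : Char) :
    pvCls ((x :: xs) ++ [c]) = if pvAValid ((x :: xs) ++ [c]) = true then 2 else 3 := by
  have hne : (((x :: xs) ++ [c]) == ['+'] || ((x :: xs) ++ [c]) == ['-']) = false := by
    cases xs <;> simp
  unfold pvCls
  rw [if_neg (by simp), if_neg (by rw [hne]; simp)]

-- a nonempty token is never in state 0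
theorem pvCls_cons_ne_zero (x : Char) (xs : List Char) : pvCls (x :: xs) ≠ 0 := by
  unfold pvCls
  split_ifs <;> simp_all

-- the DFA transition on a digit computes pvCls of the grown token
theorem cls_digit (w : List Char) (c : Char) (h : PySem.Chars.isdigit c = true) :
    pvCls (w ++ [c]) = (if pvCls w == 0 || pvCls w == 1 || pvCls w == 2 then 2 else 3) := by
  obtain ⟨-, hns⟩ := digit_facts c h
  cases w with
  | nil =>
    have h1 : (([c] : List Char) == ['+'] || ([c] : List Char) == ['-']) = false := by
      simpa [beq_eq_decide] using hns
    simp only [pvCls, List.nil_append, List.isEmpty_nil, List.isEmpty_cons, if_false, h1,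
      Bool.false_eq_true]
    simp [pvAValid, PySem.Chars.strIsdigit, h]
  | cons x xs =>
    have hc : pvCls (x :: xs) = if ((x :: xs) == ['+'] || (x :: xs) == ['-']) = true
        then 1 else if pvAValid (x :: xs) = true then 2 else 3 := by
      unfold pvCls
      rw [if_neg (by simp)]
    rw [pvCls_snoc, valid_append, hc]
    by_cases h1 : ((x :: xs) == ['+'] || (x :: xs) == ['-']) = true
    · rw [if_pos h1, h1, h]
      simp
    · have h1' : ((x :: xs) == ['+'] || (x :: xs) == ['-']) = false := by simpa using h1
      rw [if_neg h1, h1']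
      by_cases h2 : pvAValid (x :: xs) = true
      · rw [if_pos h2, h2, h]
        simp
      · have h2' : pvAValid (x :: xs) = false := by simpa using h2
        rw [if_neg h2, h2']
        simp

-- the DFA transition on a sign computes pvCls of the grown token
theorem cls_sign (w : List Char) (c : Char) (hd : PySem.Chars.isdigit c = false)
    (hs : (c == '+' || c == '-') = true) :
    pvCls (w ++ [c]) = (if pvCls w == 0 then 1 else 3) := by
  cases w with
  | nil =>
    have h1 : (([c] : List Char) == ['+'] || ([c] : List Char) == ['-']) = true := by
      rcases Bool.or_eq_true _ _ |>.mp hs with h | h <;>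
        (rw [beq_iff_eq] at h; subst h; decide)
    simp only [List.nil_append]
    unfold pvCls
    rw [if_neg (by simp), if_pos h1]
    simp
  | cons x xs =>
    have hv := valid_append x xs c
    rw [hd] at hv
    simp only [Bool.and_false] at hv
    rw [pvCls_snoc, hv]
    have h0 := pvCls_cons_ne_zero x xs
    simp [h0]

-- state 2 means exactly: the (nonempty) current token is a valid integer
theorem cls_eq_two (x : Char) (xs : List Char) :
    (pvCls (x :: xs) == 2) = pvAValid (x :: xs) := by
  have hc : pvCls (x :: xs) = if ((x :: xs) == ['+'] || (x :: xs) == ['-']) = true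
      then 1 else if pvAValid (x :: xs) = true then 2 else 3 := by
    unfold pvCls
    rw [if_neg (by simp)]
  rw [hc]
  by_cases h1 : ((x :: xs) == ['+'] || (x :: xs) == ['-']) = true
  · rw [if_pos h1, sign_not_valid _ h1]
    rfl
  · rw [if_neg h1]
    by_cases h2 : pvAValid (x :: xs) = true
    · rw [if_pos h2, h2]
      rfl
    · have h2' : pvAValid (x :: xs) = false := by simpa using h2
      rw [if_neg h2, h2']
      rfl

-- coupling invariant: B's fold state is A's fold state, filtered and classified
theorem coupling (cs : List Char) : ∀ (ws : List (List Char)) (cur : List Char),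
    cs.foldl pvBStep (ws.filter pvAValid, cur, pvCls cur)
      = ((cs.foldl pvAStep (ws, cur)).1.filter pvAValid,
         (cs.foldl pvAStep (ws, cur)).2,
         pvCls (cs.foldl pvAStep (ws, cur)).2) := by
  induction cs with
  | nil => intro ws cur; simp
  | cons c cs ih =>
    intro ws cur
    rw [List.foldl_cons, List.foldl_cons]
    by_cases hd : PySem.Chars.isdigit c = true
    · obtain ⟨htok, -⟩ := digit_facts c hd
      have hB : pvBStep (ws.filter pvAValid, cur, pvCls cur) c
          = (ws.filter pvAValid, cur ++ [c], pvCls (cur ++ [c])) := by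
        simp only [pvBStep, hd, if_true]
        rw [cls_digit cur c hd]
      have hA : pvAStep (ws, cur) c = (ws, cur ++ [c]) := by
        simp [pvAStep, htok]
      rw [hB, hA, ih]
    · rw [Bool.not_eq_true] at hd
      by_cases hs : (c == '+' || c == '-') = true
      · have htok : pvATok c = true := by
          rcases Bool.or_eq_true _ _ |>.mp hs with h | h <;>
            (rw [beq_iff_eq] at h; subst h; decide)
        have hB : pvBStep (ws.filter pvAValid, cur, pvCls cur) c
            = (ws.filter pvAValid, cur ++ [c], pvCls (cur ++ [c])) := by
          simp only [pvBStep, hd, if_false, Bool.false_eq_true, sign_mem, hs, if_true]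
          rw [cls_sign cur c hd hs]
        have hA : pvAStep (ws, cur) c = (ws, cur ++ [c]) := by
          simp [pvAStep, htok]
        rw [hB, hA, ih]
      · rw [Bool.not_eq_true] at hs
        have htok := other_tok c hd hs
        cases cur with
        | nil =>
          have hs' : ¬c = '+' ∧ ¬c = '-' := by simpa using hs
          have hB : pvBStep (ws.filter pvAValid, [], pvCls []) c
              = (ws.filter pvAValid, [], pvCls []) := by
            simp [pvBStep, hd, hs'.1, hs'.2, pvCls]
          have hA : pvAStep (ws, ([] : List Char)) c = (ws, []) := by
            simp [pvAStep, htok]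
          rw [hB, hA, ih]
        | cons x xs =>
          have hA : pvAStep (ws, x :: xs) c = (ws ++ [x :: xs], []) := by
            simp [pvAStep, htok]
          have hfil : (ws ++ [x :: xs]).filter pvAValid
              = ws.filter pvAValid ++ (if pvAValid (x :: xs) then [x :: xs] else []) := by
            rw [List.filter_append, List.filter_singleton]
            simp [Bool.cond_eq_ite]
          have hB : pvBStep (ws.filter pvAValid, x :: xs, pvCls (x :: xs)) c
              = ((ws ++ [x :: xs]).filter pvAValid, [], pvCls []) := by
            unfold pvBStep
            rw [if_neg (by simp [hd]), if_neg (by rw [sign_mem, hs]; simp),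
              if_neg (by simp), cls_eq_two, hfil]
            by_cases hv : pvAValid (x :: xs) = true
            · rw [if_pos hv, if_pos hv]
              simp [pvCls]
            · rw [if_neg hv, if_neg hv]
              simp [pvCls]
          rw [hB, hA, ih]

-- A's counting loop is length-of-filter paired with the filter
theorem count_loop (ws : List (List Char)) : ∀ (n : Int) (vs : List (List Char)),
    ws.foldl (fun (acc : Int × List (List Char)) w =>
        if pvAValid w then (acc.1 + 1, acc.2 ++ [w]) else acc) (n, vs)
      = (n + (ws.filter pvAValid).length, vs ++ ws.filter pvAValid) := by
  induction ws with
  | nil => intro n vs; simp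
  | cons w ws ih =>
    intro n vs
    by_cases h : pvAValid w = true
    · simp only [List.foldl_cons, h, if_pos, ih, List.filter_cons]
      exact Prod.ext (by push_cast [List.length_cons]; ring) (by simp)
    · simp [List.foldl_cons, h, ih]

-- ===== VERDICT (by name: the statement is the Claim_ definition above) =====
theorem count_valid_integers_spec : Claim_equal_count_valid_integers := by
  intro code _
  unfold Spec_count_valid_integers count_valid_integers count_valid_integers_alt
  have hc := coupling code.toList [] []
  simp only [List.filter_nil] at hc
  have hcls : pvCls ([] : List Char) = 0 := rfl
  rw [hcls] at hc
  rw [hc]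
  rcases hA : code.toList.foldl pvAStep ([], []) with ⟨ws, cur⟩
  cases cur with
  | nil => simp [count_loop, pvCls]
  | cons x xs =>
    by_cases hv : pvAValid (x :: xs) = true
    · have h2 : (pvCls (x :: xs) == 2) = true := by rw [cls_eq_two, hv]
      simp [count_loop, h2, hv]
    · have hv' : pvAValid (x :: xs) = false := by simpa using hv
      have h2 : (pvCls (x :: xs) == 2) = false := by rw [cls_eq_two, hv']
      simp [count_loop, h2, hv']
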